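-- pv_equiv track=rewrite | github.com/Psyqotato/leetcode | 1446.py | maxPower
-- ===== SOURCE A (Python) =====
-- def maxPower(s: str) -> int:
--     count, result = 1, 1
--     for i in range(1,len(s)):
--         if s[i - 1] == s[i]:
--             count += 1
--             result = max(result, count)
--         else:
--             count = 1
--     return result
-- ===== SOURCE B (Python) =====
-- from itertools import groupby
--
--
-- def maxPower(s: str) -> int:
--     return max((sum(1 for _ in g) for _, g in groupby(s)), default=1)
-- ===== Notes on version B (the rewrite author's own statement) =====
-- stated objective: idiomatic
-- what changed: Replaces the manual index loop with its running counter and running max by a groupby-based reduction: group s into maximal runs of equal characters and take the maximum run length, with default 1 for the empty string.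
import Mathlib
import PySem

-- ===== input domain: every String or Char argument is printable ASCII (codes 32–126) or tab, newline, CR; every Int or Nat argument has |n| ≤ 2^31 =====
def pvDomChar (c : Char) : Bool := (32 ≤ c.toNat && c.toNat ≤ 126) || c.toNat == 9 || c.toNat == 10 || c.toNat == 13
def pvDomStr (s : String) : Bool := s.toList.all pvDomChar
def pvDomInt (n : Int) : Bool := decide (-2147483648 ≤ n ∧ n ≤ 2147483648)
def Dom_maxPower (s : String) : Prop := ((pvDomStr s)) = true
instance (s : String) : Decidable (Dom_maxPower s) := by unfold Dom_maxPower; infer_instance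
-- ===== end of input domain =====

-- B replaces A's index loop with a groupby-style run decomposition and a max over run lengths (idiomatic, same cost).

-- ===== PORT A =====
-- for i in range(1, len(s)): compare s[i-1] with s[i], maintain (count, result); indices are always in range
def maxPower (s : String) : Int :=
  (((PySem.List.pyRange 1 (PySem.Str.len s) 1).foldl
    (fun (q : Int × Int) i =>
      if PySem.List.pyGetD s.toList (i - 1) ' ' = PySem.List.pyGetD s.toList i ' ' then
        (q.1 + 1, max q.2 (q.1 + 1))
      else
        (1, q.2)) ((1 : Int), (1 : Int)))).2

-- ===== PORT B =====
-- itertools.groupby(s): the lengths of the maximal runs of equal characters, in order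
def pvRunsAux (c : Char) (n : Nat) : List Char → List Nat
  | [] => [n]
  | x :: xs => if x = c then pvRunsAux c (n + 1) xs else n :: pvRunsAux x 1 xs

def pvRuns : List Char → List Nat
  | [] => []
  | x :: xs => pvRunsAux x 1 xs

-- max(..., default=1): Python's max folds left over the elements, default when empty
def pvMaxDefault1 (l : List Nat) : Int :=
  match l with
  | [] => 1
  | x :: xs => xs.foldl (fun (a : Int) (b : Nat) => max a (b : Int)) (x : Int)

def maxPower_alt (s : String) : Int := pvMaxDefault1 (pvRuns s.toList)

-- ===== PRECONDITION & SPEC =====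
def Spec_maxPower (s : String) (out : Int) : Prop := out = maxPower_alt s
instance (s : String) (out : Int) : Decidable (Spec_maxPower s out) := by unfold Spec_maxPower; infer_instance

-- ===== CLAIM (what is proved, stated in full; the proofs are below) =====
def Claim_equal_maxPower : Prop := ∀ (s : String), Dom_maxPower s → Spec_maxPower s (maxPower s)

-- ===== LEMMAS AND PROOFS =====

-- A's loop as a structural scan over the tail, carrying the previous character
def pvScan (c : Char) (p : Int × Int) : List Char → Int × Int
  | [] => p
  | x :: xs => if c = x then pvScan x (p.1 + 1, max p.2 (p.1 + 1)) xs else pvScan x (1, p.2) xs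

-- max of a list of naturals (as Int), floored at 1
def pvMaxL (l : List Nat) : Int := l.foldl (fun (a : Int) (b : Nat) => max a (b : Int)) 1

theorem pvFoldlMax_comm (t : List Nat) (i j : Int) :
    t.foldl (fun (a : Int) (b : Nat) => max a (b : Int)) (max i j)
      = max i (t.foldl (fun (a : Int) (b : Nat) => max a (b : Int)) j) := by
  induction t generalizing j with
  | nil => rfl
  | cons x xs ih =>
    rw [List.foldl_cons, List.foldl_cons, max_assoc, ih]

theorem pvMaxL_cons (a : Nat) (t : List Nat) : pvMaxL (a :: t) = max (a : Int) (pvMaxL t) := by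
  unfold pvMaxL
  rw [List.foldl_cons, max_comm (1 : Int) (a : Int), pvFoldlMax_comm]

theorem pvMaxL_nil : pvMaxL [] = 1 := rfl

theorem pvMaxL_ge_one (l : List Nat) : 1 ≤ pvMaxL l := by
  induction l with
  | nil => rw [pvMaxL_nil]
  | cons x xs ih => rw [pvMaxL_cons]; omega

theorem pvMaxL_runsAux_ge (xs : List Char) (c : Char) (n : Nat) :
    (n : Int) ≤ pvMaxL (pvRunsAux c n xs) := by
  induction xs generalizing c n with
  | nil => rw [pvRunsAux, pvMaxL_cons, pvMaxL_nil]; omega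
  | cons x xs ih =>
    rw [pvRunsAux]
    split
    · have := ih c (n + 1); omega
    · rw [pvMaxL_cons]; omega

theorem pvRunsAux_head (xs : List Char) (c : Char) (n : Nat) :
    ∃ h t, pvRunsAux c n xs = h :: t ∧ n ≤ h := by
  induction xs generalizing c n with
  | nil => exact ⟨n, [], rfl, le_refl n⟩
  | cons x xs ih =>
    rw [pvRunsAux]
    split
    · obtain ⟨h, t, he, hge⟩ := ih c (n + 1)
      exact ⟨h, t, he, by omega⟩
    · exact ⟨n, _, rfl, le_refl n⟩

theorem pvScan_eq_max (xs : List Char) (c : Char) (n : Nat) (r : Int)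
    (h1 : 1 ≤ n) (h2 : (n : Int) ≤ r) :
    (pvScan c ((n : Int), r) xs).2 = max r (pvMaxL (pvRunsAux c n xs)) := by
  induction xs generalizing c n r with
  | nil =>
    rw [pvScan, pvRunsAux, pvMaxL_cons, pvMaxL_nil]
    simp only []
    omega
  | cons x xs ih =>
    rw [pvScan, pvRunsAux]
    by_cases hcx : c = x
    · subst hcx
      simp only [if_true]
      have h3 : (((n : Nat) : Int) + 1) = (((n + 1 : Nat)) : Int) := by push_cast; ring
      rw [h3, ih c (n + 1) (max r (((n + 1 : Nat)) : Int)) (by omega) (by omega)]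
      have hge := pvMaxL_runsAux_ge xs c (n + 1)
      omega
    · have hxc : ¬ (x = c) := fun h => hcx h.symm
      rw [if_neg hcx, if_neg hxc]
      show (pvScan x ((1 : Int), r) xs).2 = max r (pvMaxL (n :: pvRunsAux x 1 xs))
      have hr : (pvScan x ((1 : Int), r) xs).2 = max r (pvMaxL (pvRunsAux x 1 xs)) := by
        have := ih x 1 r (le_refl 1) (by omega)
        simpa using this
      rw [hr, pvMaxL_cons]
      have hge := pvMaxL_ge_one (pvRunsAux x 1 xs)
      omega

-- the index loop of A equals the structural scan, for any split l = pre ++ c :: xs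
theorem pvFoldA (l : List Char) (xs : List Char) :
    ∀ (pre : List Char) (c : Char) (p : Int × Int), l = pre ++ c :: xs →
    ((PySem.List.pyRange ((pre.length : Int) + 1) (l.length : Int) 1).foldl
      (fun (q : Int × Int) i =>
        if PySem.List.pyGetD l (i - 1) ' ' = PySem.List.pyGetD l i ' ' then
          (q.1 + 1, max q.2 (q.1 + 1))
        else
          (1, q.2)) p) = pvScan c p xs := by
  induction xs with
  | nil =>
    intro pre c p hl
    have hlen : (l.length : Int) = (pre.length : Int) + 1 := by subst hl; simp
    rw [hlen, PySem.List.pyRange_one_eq_nil (by omega)]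
    rfl
  | cons x xs ih =>
    intro pre c p hl
    have hlen : (l.length : Int) = (pre.length : Int) + 1 + (xs.length : Int) + 1 := by
      subst hl; simp; omega
    rw [PySem.List.pyRange_one_cons (by omega)]
    rw [List.foldl_cons]
    have hg1 : PySem.List.pyGetD l ((pre.length : Int) + 1 - 1) ' ' = c := by
      rw [show ((pre.length : Int) + 1 - 1) = ((pre.length : Nat) : Int) by ring,
        PySem.List.pyGetD_natCast, List.getD_eq_getElem?_getD, hl,
        List.getElem?_append_right (le_refl pre.length)]
      simp
    have hg2 : PySem.List.pyGetD l ((pre.length : Int) + 1) ' ' = x := by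
      rw [show ((pre.length : Int) + 1) = (((pre.length + 1 : Nat)) : Int) by push_cast; ring,
        PySem.List.pyGetD_natCast, List.getD_eq_getElem?_getD,
        show l = (pre ++ [c]) ++ x :: xs by rw [hl]; simp,
        show pre.length + 1 = (pre ++ [c]).length by simp,
        List.getElem?_append_right (le_refl (pre ++ [c]).length)]
      simp
    rw [hg1, hg2]
    have hpre : l = (pre ++ [c]) ++ x :: xs := by rw [hl]; simp
    by_cases hcx : c = x
    · rw [if_pos hcx, pvScan, if_pos hcx]
      have := ih (pre ++ [c]) x (p.1 + 1, max p.2 (p.1 + 1)) hpre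
      rw [show (((pre ++ [c]).length : Nat) : Int) + 1 = (pre.length : Int) + 1 + 1 by
        simp] at this
      exact this
    · rw [if_neg hcx, pvScan, if_neg hcx]
      have := ih (pre ++ [c]) x (1, p.2) hpre
      rw [show (((pre ++ [c]).length : Nat) : Int) + 1 = (pre.length : Int) + 1 + 1 by
        simp] at this
      exact this

theorem pvMaxDefault1_runsAux (xs : List Char) (x : Char) :
    pvMaxDefault1 (pvRunsAux x 1 xs) = pvMaxL (pvRunsAux x 1 xs) := by
  obtain ⟨h, t, he, hge⟩ := pvRunsAux_head xs x 1
  rw [he]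
  unfold pvMaxDefault1 pvMaxL
  rw [List.foldl_cons, show max (1 : Int) ((h : Nat) : Int) = ((h : Nat) : Int) by omega]

-- ===== VERDICT (by name: the statement is the Claim_ definition above) =====
theorem maxPower_spec : Claim_equal_maxPower := by
  intro s _
  unfold Spec_maxPower maxPower maxPower_alt
  rw [PySem.Str.len_eq]
  cases hl : s.toList with
  | nil =>
    rw [show ((([] : List Char).length : Nat) : Int) = 0 by simp,
      PySem.List.pyRange_one_eq_nil (by norm_num)]
    rfl
  | cons x xs =>
    have h0 := pvFoldA (x :: xs) xs [] x ((1 : Int), (1 : Int)) (by simp)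
    rw [show ((([] : List Char).length : Nat) : Int) + 1 = (1 : Int) by simp] at h0
    rw [h0]
    rw [show ((1 : Int), (1 : Int)) = (((1 : Nat) : Int), (1 : Int)) by norm_num]
    rw [pvScan_eq_max xs x 1 1 (by omega) (by norm_num)]
    rw [pvRuns, pvMaxDefault1_runsAux]
    have := pvMaxL_ge_one (pvRunsAux x 1 xs)
    omega
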